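-- pv_equiv track=rewrite | github.com/sys-ryan/algorithm-test | 0629/1891.py | go
-- ===== SOURCE A (Python) =====
-- def go(a, index, r, c, size):
--   # index 번째 글자를 찾아야 함
--   # 가장 왼쪽 위 칸은 r행 c열
--   # 변의 길이는 size
--
--   if size == 1:
--     return (r, c)
--   else:
--     m = size//2
--     if a[index] == '1':
--       return go(a, index+1, r, c+m, m) # 1 사분면
--     elif a[index] == '2':
--       return go(a, index+1, r, c, m) # 2 사분면
--     elif a[index] == '3':
--       return go(a, index+1, r+m, c, m) # 3 사분면
--     elif a[index] == '4':
--       return go(a, index+1, r+m, c+m, m) # 4 사분면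
--   return (0, 0)
-- ===== SOURCE B (Python) =====
-- def go(a, index, r, c, size):
--     # Iterative: the side length after descending i levels is size >> i, so walk
--     # the digit positions directly instead of recursing with a halved size.
--     i = 0
--     while size >> i != 1:
--         d = a[index + i]
--         m = size >> (i + 1)
--         if d == '1':
--             c += m
--         elif d == '3':
--             r += m
--         elif d == '4':
--             r += m
--             c += m
--         elif d != '2':
--             return (0, 0)
--         i += 1
--     return (r, c)
-- ===== Notes on version B (the rewrite author's own statement) =====
-- stated objective: alternative
-- what changed: Replaces A's recursion (which passes a halved size and a shifted index down each call) with a single flat loop over the digit positions, computing the side length at level i directly as size >> i and the quadrant offset as size >> (i+1).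
import Mathlib
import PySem

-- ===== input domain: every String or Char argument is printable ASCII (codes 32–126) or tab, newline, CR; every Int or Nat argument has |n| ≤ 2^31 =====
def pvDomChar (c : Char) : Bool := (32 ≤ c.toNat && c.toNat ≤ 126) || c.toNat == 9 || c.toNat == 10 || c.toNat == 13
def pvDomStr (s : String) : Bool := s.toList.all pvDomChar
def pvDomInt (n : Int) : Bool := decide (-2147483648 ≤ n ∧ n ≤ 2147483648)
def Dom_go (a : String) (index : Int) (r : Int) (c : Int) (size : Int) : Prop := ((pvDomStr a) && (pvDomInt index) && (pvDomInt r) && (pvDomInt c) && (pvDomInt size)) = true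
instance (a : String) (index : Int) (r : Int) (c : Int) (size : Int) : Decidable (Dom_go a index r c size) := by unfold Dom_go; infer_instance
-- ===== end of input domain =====

-- B replaces A's recursion (halved size and shifted index passed down each call) by a single flat
-- loop over the digit positions, computing the side at level i directly as size >> i; objective: alternative decomposition.

-- ===== PORT A =====
def go (a : String) (index : Int) (r : Int) (c : Int) (size : Int) : Int × Int :=
  if size = 1 then (r, c)
  else if _h0 : size ≤ 0 then (0, 0)
    -- totality guard: for size ≤ 0 Python A never returns via THIS path (it recurses until it
    -- either raises or hits the non-digit (0,0) fall-through); the raising inputs are outside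
    -- Pre_go, and wherever Python A does return for size ≤ 0 its value is exactly (0, 0)
  else
    let m := PySem.Int.floordiv size 2
    match PySem.Str.pyGet? a index with
    | none => (0, 0)  -- Python raises IndexError here (outside Pre_go)
    | some ch =>
      if ch = '1' then go a (index + 1) r (c + m) m
      else if ch = '2' then go a (index + 1) r c m
      else if ch = '3' then go a (index + 1) (r + m) c m
      else if ch = '4' then go a (index + 1) (r + m) (c + m) m
      else (0, 0)
termination_by size.toNat
decreasing_by
  all_goals
    rw [show PySem.Int.floordiv size 2 = size / 2 from PySem.Int.floordiv_eq_ediv_of_pos (by omega)]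
    omega

-- ===== PORT B =====
-- the while-loop of Source B, with the loop counter i as the recursion argument
def goAltLoop (a : String) (index : Int) (size : Int) (i : Nat) (r : Int) (c : Int) : Int × Int :=
  if size >>> i = 1 then (r, c)
  else
    match h : PySem.Str.pyGet? a (index + (i : Int)) with
    | none => (0, 0)  -- Python raises IndexError here (outside Pre_go)
    | some d =>
      let m := size >>> (i + 1)
      if d = '1' then goAltLoop a index size (i + 1) r (c + m)
      else if d = '3' then goAltLoop a index size (i + 1) (r + m) c
      else if d = '4' then goAltLoop a index size (i + 1) (r + m) (c + m)
      else if d ≠ '2' then (0, 0)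
      else goAltLoop a index size (i + 1) r c
termination_by ((a.toList.length : Int) - index - (i : Int)).toNat
decreasing_by
  all_goals
    have hin : PySem.Raise.InRange a.toList.length (index + (i : Int)) := by
      by_contra hni
      rw [← PySem.List.pyGet?_eq_none_iff] at hni
      have h' : PySem.List.pyGet? a.toList (index + (i : Int)) = some d := by simpa using h
      rw [h'] at hni
      exact absurd hni (Option.some_ne_none d)
    unfold PySem.Raise.InRange at hin
    omega

def go_alt (a : String) (index : Int) (r : Int) (c : Int) (size : Int) : Int × Int :=
  goAltLoop a index size 0 r c

-- ===== PRECONDITION & SPEC =====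
-- Pre_go is exactly where Python A returns normally (no IndexError / no unbounded recursion):
-- size = 1 returns at once; otherwise A reads consecutive characters from index — at most
-- bit_length(size)-1 of them when size ≥ 2, unboundedly many when size ≤ 0 — until a
-- non-'1'..'4' character stops it, so either the whole size ≥ 2 window is in range or some
-- in-range position of the scan must hold a character other than '1'..'4'.
def Pre_go (a : String) (index : Int) (r : Int) (c : Int) (size : Int) : Prop :=
  size = 1 ∨
  (-(PySem.Str.len a) ≤ index ∧
    ((2 ≤ size ∧ index + ((PySem.Int.bitLength size - 1 : Nat) : Int) ≤ PySem.Str.len a) ∨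
     ∃ j ∈ PySem.List.pyRange index (PySem.Str.len a) 1,
       (2 ≤ size → j < index + ((PySem.Int.bitLength size - 1 : Nat) : Int)) ∧
       PySem.Str.pyGet? a j ∉ ([some '1', some '2', some '3', some '4'] : List (Option Char))))
instance (a : String) (index : Int) (r : Int) (c : Int) (size : Int) : Decidable (Pre_go a index r c size) := by unfold Pre_go; infer_instance

def pvWitness_go : String × Int × Int × Int × Int := ("31", 0, 0, 0, 4)

def Spec_go (a : String) (index : Int) (r : Int) (c : Int) (size : Int) (out : Int × Int) : Prop := out = go_alt a index r c size
instance (a : String) (index : Int) (r : Int) (c : Int) (size : Int) (out : Int × Int) : Decidable (Spec_go a index r c size out) := by unfold Spec_go; infer_instance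

-- ===== CLAIM (what is proved, stated in full; the proofs are below) =====
def Claim_equal_go : Prop := ∀ (a : String) (index : Int) (r : Int) (c : Int) (size : Int), Dom_go a index r c size → Pre_go a index r c size → Spec_go a index r c size (go a index r c size)

-- ===== LEMMAS AND PROOFS =====

-- unfolding equation for goAltLoop with the match equation discarded
lemma goAltLoop_eq (a : String) (index size : Int) (i : Nat) (r c : Int) :
    goAltLoop a index size i r c =
      if size >>> i = 1 then (r, c)
      else
        match PySem.Str.pyGet? a (index + (i : Int)) with
        | none => (0, 0)
        | some d =>
          let m := size >>> (i + 1)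
          if d = '1' then goAltLoop a index size (i + 1) r (c + m)
          else if d = '3' then goAltLoop a index size (i + 1) (r + m) c
          else if d = '4' then goAltLoop a index size (i + 1) (r + m) (c + m)
          else if d ≠ '2' then (0, 0)
          else goAltLoop a index size (i + 1) r c := by
  rw [goAltLoop]
  split
  · rfl
  · split
    · next heq =>
        have heq' : PySem.List.pyGet? a.toList (index + (i : Int)) = none := by simpa using heq
        simp [heq']
    · next d heq =>
        have heq' : PySem.List.pyGet? a.toList (index + (i : Int)) = some d := by simpa using heq
        simp [heq']

-- size >> (i+1) is the floor-halving of size >> i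
lemma shift_succ_eq_half (size : Int) (i : Nat) (h : 0 < size >>> i) :
    size >>> (i + 1) = PySem.Int.floordiv (size >>> i) 2 := by
  rw [PySem.Int.floordiv_eq_ediv_of_pos (show (0:Int) < 2 by omega)]
  rw [show i + 1 = i + (1:Nat) from rfl, Int.shiftRight_add]
  simp [Int.shiftRight_eq_div_pow]

-- a non-positive int stays non-positive under right shift
lemma shift_nonpos (size : Int) (i : Nat) (h : size ≤ 0) : size >>> i ≤ 0 := by
  rw [Int.shiftRight_eq_div_pow]
  exact Int.ediv_nonpos_of_nonpos_of_neg h (by positivity)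

-- for size ≤ 0 the loop never sees side 1, so Source B scans until a non-digit (0,0) or IndexError
lemma loop_nonpos (a : String) (index : Int) (size : Int) (hs : size ≤ 0) :
    ∀ (i : Nat) (r c : Int), goAltLoop a index size i r c = (0, 0) := by
  intro i r c
  induction i, r, c using goAltLoop.induct a index size with
  | case1 i r c h1 => exact absurd h1 (by have := shift_nonpos size i hs; omega)
  | case2 i r c h1 h =>
    have h' : PySem.List.pyGet? a.toList (index + (i : Int)) = none := by simpa using h
    rw [goAltLoop_eq]; simp [h1, h']
  | case3 i r c h1 m h ih =>
    have h' : PySem.List.pyGet? a.toList (index + (i : Int)) = some '1' := by simpa using h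
    rw [goAltLoop_eq]; simp only [h1, if_false]; simp [h']; exact ih
  | case4 i r c h1 m h _hne ih =>
    have h' : PySem.List.pyGet? a.toList (index + (i : Int)) = some '3' := by simpa using h
    rw [goAltLoop_eq]; simp only [h1, if_false]; simp [h']; exact ih
  | case5 i r c h1 m h _hn1 _hn3 ih =>
    have h' : PySem.List.pyGet? a.toList (index + (i : Int)) = some '4' := by simpa using h
    rw [goAltLoop_eq]; simp only [h1, if_false]; simp [h']; exact ih
  | case6 i r c h1 d h hd1 hd3 hd4 hd2 =>
    have h' : PySem.List.pyGet? a.toList (index + (i : Int)) = some d := by simpa using h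
    rw [goAltLoop_eq]; simp [h1, h', hd1, hd3, hd4, hd2]
  | case7 i r c h1 d h hd1 hd3 hd4 hd2 ih =>
    have h' : PySem.List.pyGet? a.toList (index + (i : Int)) = some d := by simpa using h
    rw [goAltLoop_eq]; simp only [h1, if_false]; simp [h', hd1, hd3, hd4, hd2]; exact ih

-- loop invariant for positive size: with s = size >> i the current side, the remaining loop
-- iterations compute exactly what A's recursive call go a (index+i) r c s computes
lemma loop_eq (a : String) (index : Int) (size : Int) :
    ∀ (n : Nat) (i : Nat) (r c : Int), 1 ≤ size >>> i →
      PySem.Int.bitLength (size >>> i) = n →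
      goAltLoop a index size i r c = go a (index + (i : Int)) r c (size >>> i) := by
  intro n
  induction n with
  | zero =>
    intro i r c hpos hn
    have := PySem.Int.lt_two_pow_bitLength (size >>> i)
    rw [hn] at this
    omega
  | succ m ih =>
    intro i r c hpos hn
    by_cases hs1 : size >>> i = 1
    · rw [goAltLoop_eq, go, hs1]; simp
    · have hs2 : 2 ≤ size >>> i := by omega
      have hm : size >>> (i + 1) = PySem.Int.floordiv (size >>> i) 2 :=
        shift_succ_eq_half size i (by omega)
      have hm1 : 1 ≤ size >>> (i + 1) := by
        rw [hm, PySem.Int.floordiv_eq_ediv_of_pos (show (0:Int) < 2 by omega)]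
        omega
      have hn' : PySem.Int.bitLength (size >>> (i + 1)) = m := by
        rw [hm]
        have := PySem.Int.bitLength_of_pos (n := size >>> i) (by omega)
        omega
      have h0 : ¬ (size >>> i ≤ 0) := by omega
      rw [goAltLoop_eq, go]
      simp only [hs1, h0, if_false]
      cases hch : PySem.Str.pyGet? a (index + (i : Int)) with
      | none => rfl
      | some ch =>
        have hcast : index + (i : Int) + 1 = index + ((i + 1 : Nat) : Int) := by push_cast; ring
        by_cases e1 : ch = '1'
        · rw [ih (i + 1) r (c + size >>> (i + 1)) hm1 hn']
          simp [e1, hm, hcast]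
        · by_cases e2 : ch = '2'
          · rw [ih (i + 1) r c hm1 hn']
            simp [e2, hm, hcast]
          · by_cases e3 : ch = '3'
            · rw [ih (i + 1) (r + size >>> (i + 1)) c hm1 hn']
              simp [e3, hm, hcast]
            · by_cases e4 : ch = '4'
              · rw [ih (i + 1) (r + size >>> (i + 1)) (c + size >>> (i + 1)) hm1 hn']
                simp [e4, hm, hcast]
              · simp [e1, e2, e3, e4]

-- ===== VERDICT (by name: the statement is the Claim_ definition above) =====
theorem go_spec : Claim_equal_go := by
  intro a index r c size _hdom _hpre
  unfold Spec_go go_alt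
  by_cases hs : size <= 0
  · rw [loop_nonpos a index size hs 0 r c, go]
    simp [show ¬ (size = 1) by omega, hs]
  · have h0 : (1:Int) ≤ size >>> (0:Nat) := by rw [Int.shiftRight_zero]; omega
    have := loop_eq a index size (PySem.Int.bitLength (size >>> (0:Nat))) 0 r c h0 rfl
    rw [Int.shiftRight_zero] at this
    simpa using this.symm
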